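-- pv_equiv track=rewrite | github.com/Drogalion01/Codes-of-lifetime | _find_case.py | buggy
-- ===== SOURCE A (Python) =====
-- def buggy(n,h,k,a):
--     tmp=[(0,0)]*n
--     for i in range(n):
--         mx=max(a[i:])
--         idx=a.index(mx, i)
--         tmp[i]=(mx,idx)
--     s=sum(a)
--     if s==0:
--         return None
--     cy=h//s
--     t=cy*n+max(0,cy-1)*k
--     if h%s==0:
--         return t
--     else:
--         if cy>0:
--             t+=k
--         rem=h%s
--         for i in range(n):
--             if tmp[i][0]>=rem:
--                 t+=1
--                 return t
--             else:
--                 rem-=a[i]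
--                 t+=1
--     return t
-- ===== SOURCE B (Python) =====
-- def buggy(n, h, k, a):
--     # one backward pass: suf[i] == max(a[i:])  (O(len(a)) instead of A's O(n*len(a)))
--     suf = []
--     cur = None
--     for x in reversed(a):
--         cur = x if cur is None else (x if x > cur else cur)
--         suf.append(cur)
--     suf.reverse()
--     s = sum(a)
--     if s == 0:
--         return None
--     cy = h // s
--     t = cy * n + max(0, cy - 1) * k
--     rem = h % s
--     if rem == 0:
--         return t
--     if cy > 0:
--         t += k
--     for i in range(n):
--         t += 1
--         if suf[i] >= rem:
--             return t
--         rem -= a[i]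
--     return t
-- ===== Notes on version B (the rewrite author's own statement) =====
-- stated objective: faster
-- what changed: A recomputes max(a[i:]) (and its index) from scratch for every i, which is quadratic; B precomputes all suffix maxima in one backward pass and drops the unused index computation.
import Mathlib
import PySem

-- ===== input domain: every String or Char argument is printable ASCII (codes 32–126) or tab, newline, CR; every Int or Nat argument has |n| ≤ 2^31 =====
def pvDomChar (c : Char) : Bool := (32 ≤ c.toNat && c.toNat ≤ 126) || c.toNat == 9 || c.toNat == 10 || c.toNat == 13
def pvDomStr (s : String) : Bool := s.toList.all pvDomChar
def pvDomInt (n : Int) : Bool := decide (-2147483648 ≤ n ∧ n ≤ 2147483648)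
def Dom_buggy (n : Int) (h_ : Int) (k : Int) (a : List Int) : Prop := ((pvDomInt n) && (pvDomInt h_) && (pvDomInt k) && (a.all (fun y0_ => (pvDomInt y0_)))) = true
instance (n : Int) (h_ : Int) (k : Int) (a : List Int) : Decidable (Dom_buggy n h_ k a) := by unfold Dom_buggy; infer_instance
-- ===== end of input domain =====

-- B replaces A's per-index rescan max(a[i:]) by one backward suffix-maxima pass (measured faster asymptotically).


-- ===== PORT A =====
-- tmp[i] = (max(a[i:]), a.index(mx, i)): a.index(mx, i) searches a from position i,
-- i.e. position of mx in a[i:] plus i (exact; mx is always found in a[i:]).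
-- The .getD defaults can only fire when a[i:] is empty, i.e. outside Pre_buggy (Python raises there).
def aTmp (n : Int) (a : List Int) : List (Int × Int) :=
  (PySem.List.pyRange 0 n 1).map (fun i =>
    let mx := (PySem.List.max? (PySem.List.slice a (some i) none) (fun y => y)).getD 0
    let idx := ((PySem.List.index? (PySem.List.slice a (some i) none) mx).map
        (fun j => (j : Int) + i)).getD 0
    (mx, idx))

-- the second 'for i in range(n)' of A, with its early return (both exits return t)
def aLoop (tmp : List (Int × Int)) (a : List Int) : List Int → Int → Int → Int
  | [], _rem, t => t
  | i :: is, rem, t =>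
    if (PySem.List.pyGetD tmp i (0, 0)).1 ≥ rem then t + 1
    else aLoop tmp a is (rem - PySem.List.pyGetD a i 0) (t + 1)

def buggy (n : Int) (h_ : Int) (k : Int) (a : List Int) : Option Int :=
  let tmp := aTmp n a
  let s := a.sum
  if s = 0 then none
  else
    let cy := PySem.Int.floordiv h_ s
    let t := cy * n + max 0 (cy - 1) * k
    if PySem.Int.mod h_ s = 0 then some t
    else
      let t := if cy > 0 then t + k else t
      let rem := PySem.Int.mod h_ s
      some (aLoop tmp a (PySem.List.pyRange 0 n 1) rem t)

-- ===== PORT B =====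
-- 'for x in reversed(a): cur = x if cur is None else (x if x > cur else cur); suf.append(cur)'
def bStep (p : List Int × Option Int) (x : Int) : List Int × Option Int :=
  let cur := match p.2 with
    | none => x
    | some c => if x > c then x else c
  (p.1 ++ [cur], some cur)

-- suf built over reversed(a), then suf.reverse()
def bSuf (a : List Int) : List Int := (a.reverse.foldl bStep ([], none)).1.reverse

-- B's 'for i in range(n)' with t += 1 hoisted before the test
def bLoop (suf : List Int) (a : List Int) : List Int → Int → Int → Int
  | [], _rem, t => t
  | i :: is, rem, t =>
    let t' := t + 1
    if PySem.List.pyGetD suf i 0 ≥ rem then t'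
    else bLoop suf a is (rem - PySem.List.pyGetD a i 0) t'

def buggy_alt (n : Int) (h_ : Int) (k : Int) (a : List Int) : Option Int :=
  let suf := bSuf a
  let s := a.sum
  if s = 0 then none
  else
    let cy := PySem.Int.floordiv h_ s
    let t := cy * n + max 0 (cy - 1) * k
    let rem := PySem.Int.mod h_ s
    if rem = 0 then some t
    else
      let t := if cy > 0 then t + k else t
      some (bLoop suf a (PySem.List.pyRange 0 n 1) rem t)

-- ===== PRECONDITION & SPEC =====
-- Pre excludes exactly the inputs where A raises: for n > len(a) the first loop reaches
-- max(a[i:]) on an empty slice and Python raises ValueError (B raises IndexError there).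
def Pre_buggy (n : Int) (h_ : Int) (k : Int) (a : List Int) : Prop := n ≤ (a.length : Int)
instance (n : Int) (h_ : Int) (k : Int) (a : List Int) : Decidable (Pre_buggy n h_ k a) := by unfold Pre_buggy; infer_instance

def pvWitness_buggy : Int × Int × Int × List Int := (3, 7, 2, [1, 2, 3])

def Spec_buggy (n : Int) (h_ : Int) (k : Int) (a : List Int) (out : Option Int) : Prop := out = buggy_alt n h_ k a
instance (n : Int) (h_ : Int) (k : Int) (a : List Int) (out : Option Int) : Decidable (Spec_buggy n h_ k a out) := by unfold Spec_buggy; infer_instance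

-- ===== CLAIM (what is proved, stated in full; the proofs are below) =====
def Claim_equal_buggy : Prop := ∀ (n : Int) (h_ : Int) (k : Int) (a : List Int), Dom_buggy n h_ k a → Pre_buggy n h_ k a → Spec_buggy n h_ k a (buggy n h_ k a)

-- ===== LEMMAS AND PROOFS =====

-- structural description of B's suffix-maxima list
def sufR : List Int → List Int
  | [] => []
  | x :: xs =>
    (match sufR xs with
     | [] => x
     | y :: _ => if x > y then x else y) :: sufR xs

theorem bSuf_fold_eq (a : List Int) :
    a.reverse.foldl bStep ([], none) = ((sufR a).reverse, (sufR a).head?) := by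
  induction a with
  | nil => rfl
  | cons x xs ih =>
    rw [List.reverse_cons, List.foldl_append, ih]
    cases hxs : sufR xs <;> simp [bStep, sufR, hxs]

theorem bSuf_eq_sufR (a : List Int) : bSuf a = sufR a := by
  unfold bSuf
  rw [bSuf_fold_eq]
  simp

theorem foldl_max_pull (l : List Int) : ∀ x y, l.foldl max (max x y) = max x (l.foldl max y) := by
  induction l with
  | nil => intro x y; rfl
  | cons z zs ih =>
    intro x y
    simp only [List.foldl_cons, max_assoc]
    exact ih x (max y z)

theorem sufR_getD (a : List Int) (i : Nat) (h : i < a.length) :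
    (sufR a).getD i 0 = (PySem.List.max? (a.drop i) (fun y => y)).getD 0 := by
  induction a generalizing i with
  | nil => simp at h
  | cons x xs ih =>
    cases i with
    | zero =>
      rw [List.drop_zero, PySem.List.max?_id_cons, Option.getD_some]
      cases hxs : xs with
      | nil => simp [sufR]
      | cons z zs =>
        subst hxs
        have hy := ih 0 (by simp)
        rw [List.drop_zero, PySem.List.max?_id_cons, Option.getD_some] at hy
        simp only [sufR, List.getD_cons_zero] at hy
        simp only [sufR, List.getD_cons_zero, List.foldl_cons]
        rw [foldl_max_pull zs x z, ← hy, max_comm, max_def]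
        split_ifs <;> omega
    | succ j =>
      have hj : j < xs.length := by simpa using h
      have := ih j hj
      simp only [sufR, List.getD_cons_succ, List.drop_succ_cons]
      exact this

-- pointwise agreement of the two lookup tables on indices 0 ≤ i < n ≤ len(a)
theorem table_agree (n : Int) (a : List Int) (hn : n ≤ (a.length : Int))
    (i : Int) (hi : i ∈ PySem.List.pyRange 0 n 1) :
    (PySem.List.pyGetD (aTmp n a) i (0, 0)).1 = PySem.List.pyGetD (bSuf a) i 0 := by
  rw [PySem.List.mem_pyRange_one] at hi
  obtain ⟨h0, hlt⟩ := hi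
  have hilen : i.toNat < a.length := by omega
  rw [aTmp, PySem.List.pyGetD_map_pyRange_of_nonneg _ n i (0, 0) h0 hlt]
  simp only
  rw [PySem.List.slice_from a h0]
  have hcast : i = ((i.toNat : Nat) : Int) := (Int.toNat_of_nonneg h0).symm
  rw [hcast, PySem.List.pyGetD_natCast, bSuf_eq_sufR, sufR_getD a i.toNat hilen]
  simp [max_eq_left h0]

-- the two second loops agree whenever the tables agree on every visited index
theorem loop_congr (tmp : List (Int × Int)) (suf a : List Int) (is : List Int)
    (h : ∀ i ∈ is, (PySem.List.pyGetD tmp i (0, 0)).1 = PySem.List.pyGetD suf i 0) :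
    ∀ rem t, aLoop tmp a is rem t = bLoop suf a is rem t := by
  induction is with
  | nil => intro rem t; rfl
  | cons i is ih =>
    intro rem t
    have hi := h i (by simp)
    simp only [aLoop, bLoop, hi]
    split
    · rfl
    · exact ih (fun j hj => h j (by simp [hj])) _ _

-- ===== VERDICT (by name: the statement is the Claim_ definition above) =====
theorem buggy_spec : Claim_equal_buggy := by
  intro n h_ k a _hdom hpre
  unfold Spec_buggy buggy buggy_alt
  simp only
  by_cases hs : a.sum = 0
  · simp [hs]
  · simp only [hs, if_false]
    by_cases hm : PySem.Int.mod h_ a.sum = 0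
    · simp [hm]
    · simp only [hm, if_false]
      congr 1
      exact loop_congr (aTmp n a) (bSuf a) a _ (fun i hi => table_agree n a hpre i hi) _ _
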